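-- pv_equiv track=rewrite | github.com/MaDo-DoMa/LearnPython_and_alghoritms | leetcode.py | sequence_c
-- ===== SOURCE A (Python) =====
-- def ifFirstNumber(number):
--     if number == 1:
--         return False
--     for i in range(2,number):
--         if number % i == 0:
--             return False
--
--     return True
--
-- def sequence_c(A,B):
--     freq = {}
--     for b in B:
--         if b in freq:
--             freq[b] += 1
--         else:
--             freq[b] = 1
--
--     Array = []
--
--     for a in A:
--         if a not in freq or not ifFirstNumber(freq[a]):
--             Array.append(a)
--
--
--     return Array
-- ===== SOURCE B (Python) =====
-- def _is_prime_sqrt(c):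
--     # trial division only up to sqrt(c); caller guarantees c >= 2
--     d = 2
--     while d * d <= c:
--         if c % d == 0:
--             return False
--         d += 1
--     return True
--
-- def sequence_c(A, B):
--     freq = {}
--     for b in B:
--         freq[b] = freq.get(b, 0) + 1
--     prime_counts = set()
--     for c in set(freq.values()):
--         if c >= 2 and _is_prime_sqrt(c):
--             prime_counts.add(c)
--     return [a for a in A if freq.get(a) not in prime_counts]
-- ===== Notes on version B (the rewrite author's own statement) =====
-- stated objective: alternative
-- what changed: B builds the frequency map in one pass with dict.get, runs a sqrt-bounded trial division once per DISTINCT count to precompute the set of prime counts, and then filters A by a single set lookup per element, instead of A's full trial division over range(2, c) repeated for every element of A.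
import Mathlib
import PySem

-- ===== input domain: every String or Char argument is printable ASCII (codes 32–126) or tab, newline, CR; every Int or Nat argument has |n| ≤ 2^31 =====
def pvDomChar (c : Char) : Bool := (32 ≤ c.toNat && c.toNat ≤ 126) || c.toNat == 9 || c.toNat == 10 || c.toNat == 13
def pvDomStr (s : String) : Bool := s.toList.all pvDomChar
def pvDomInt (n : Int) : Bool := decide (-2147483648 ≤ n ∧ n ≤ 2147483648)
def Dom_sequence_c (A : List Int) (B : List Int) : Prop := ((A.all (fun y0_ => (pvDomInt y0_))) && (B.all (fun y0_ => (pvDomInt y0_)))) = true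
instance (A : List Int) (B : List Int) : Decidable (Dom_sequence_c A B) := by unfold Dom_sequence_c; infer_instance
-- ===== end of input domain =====

-- B replaces A's per-element full-range trial division with one frequency map, a primality
-- test up to √c run once per distinct count, and a precomputed set of prime counts (objective: alternative).

-- ===== PORT A =====
-- trial division over the whole range(2, number); early return modelled by List.any
def ifFirstNumber (number : Int) : Bool :=
  if number = 1 then false
  else if (PySem.List.pyRange 2 number 1).any (fun i => PySem.Int.mod number i == 0) then false
  else true

def sequence_c (A : List Int) (B : List Int) : List Int :=
  let freq := B.foldl (fun d b => if d.contains b then d.modify b 0 (· + 1) else d.insert b 1)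
      PySem.Dict.empty
  A.foldl (fun arr a =>
      if !(freq.contains a) || !(ifFirstNumber (freq.getD a 0)) then arr ++ [a] else arr) []

-- ===== PORT B =====
-- while d*d <= c: … ; d += 1   (caller guarantees c ≥ 2)
def isPrimeSqrt (c : Int) (d : Int) : Bool :=
  if d * d ≤ c then
    (if PySem.Int.mod c d == 0 then false else isPrimeSqrt c (d + 1))
  else true
termination_by (c + 1 - d).toNat
decreasing_by
  have hd : d ≤ c := by nlinarith [mul_self_nonneg d]
  omega

def sequence_c_alt (A : List Int) (B : List Int) : List Int :=
  let freq := B.foldl (fun d b => d.insert b (d.getD b 0 + 1)) PySem.Dict.empty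
  let primeCounts := (PySem.Set.ofList freq.values).foldl
      (fun s c => if 2 ≤ c && isPrimeSqrt c 2 then s.add c else s) PySem.Set.empty
  A.filter (fun a =>
    match freq.get? a with       -- freq.get(a) not in prime_counts; None is never in the int set
    | none => true
    | some c => !(primeCounts.contains c))

-- ===== PRECONDITION & SPEC =====
def Spec_sequence_c (A : List Int) (B : List Int) (out : List Int) : Prop := out = sequence_c_alt A B
instance (A : List Int) (B : List Int) (out : List Int) : Decidable (Spec_sequence_c A B out) := by unfold Spec_sequence_c; infer_instance

-- ===== CLAIM (what is proved, stated in full; the proofs are below) =====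
def Claim_equal_sequence_c : Prop := ∀ (A : List Int) (B : List Int), Dom_sequence_c A B → Spec_sequence_c A B (sequence_c A B)

-- ===== LEMMAS AND PROOFS =====

-- A's counting step is Counter's step
lemma stepA_eq_counter (d : PySem.Dict Int Int) (b : Int) :
    (if d.contains b then d.modify b 0 (· + 1) else d.insert b 1) = d.insert b (d.getD b 0 + 1) := by
  by_cases h : d.contains b
  · simp [h, PySem.Dict.modify, PySem.Dict.getD]
  · rw [if_neg (by simp [h]), PySem.Dict.getD_of_not_contains d 0 (by simpa using h)]
    norm_num

lemma freqA_eq_counter (B : List Int) :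
    B.foldl (fun d b => if d.contains b then d.modify b 0 (· + 1) else d.insert b 1)
      PySem.Dict.empty = PySem.Dict.counter B := by
  rw [← PySem.Dict.foldl_insert_getD_add_one_eq_counter]
  have hstep : (fun (d : PySem.Dict Int Int) (b : Int) =>
      if d.contains b then d.modify b 0 (· + 1) else d.insert b 1)
      = (fun d b => d.insert b (d.getD b 0 + 1)) :=
    funext fun d => funext fun b => stepA_eq_counter d b
  rw [hstep]

-- membership in the conditionally-built prime set
lemma mem_foldl_add_if (p : Int → Bool) (l : List Int) (s : PySem.Set Int) (c : Int) :
    c ∈ l.foldl (fun s c => if p c then s.add c else s) s ↔ c ∈ s ∨ (c ∈ l ∧ p c) := by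
  induction l generalizing s with
  | nil => simp
  | cons x t ih =>
    simp only [List.foldl_cons, ih]
    by_cases hp : p x
    · by_cases hcx : c = x <;> simp [hp, hcx, PySem.Set.mem_add]
    · by_cases hcx : c = x <;> simp [hp, hcx]

-- isPrimeSqrt c d checks every divisor e ≥ d with e*e ≤ c
lemma isPrimeSqrt_iff (c d : Int) (hd : 0 ≤ d) :
    isPrimeSqrt c d = true ↔ ∀ e : Int, d ≤ e → e * e ≤ c → ¬ (e ∣ c) := by
  revert hd
  induction d using isPrimeSqrt.induct (c := c) with
  | case1 d hle hmod =>
    intro hd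
    rw [isPrimeSqrt, if_pos hle, if_pos hmod]
    simp only [beq_iff_eq, PySem.Int.mod_eq_zero_iff_dvd] at hmod
    exact iff_of_false (by simp) (fun h => h d le_rfl hle hmod)
  | case2 d hle hmod ih =>
    intro hd
    rw [isPrimeSqrt, if_pos hle, if_neg hmod]
    simp only [beq_iff_eq, PySem.Int.mod_eq_zero_iff_dvd] at hmod
    rw [ih (by omega)]
    constructor
    · intro h e hde hee
      rcases eq_or_lt_of_le hde with rfl | hlt
      · simpa using hmod
      · exact h e (by omega) hee
    · intro h e hde hee
      exact h e (by omega) hee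
  | case3 d hgt =>
    intro hd
    rw [isPrimeSqrt, if_neg hgt]
    simp only [true_iff]
    intro e hde hee
    exact absurd hee (by nlinarith)

-- no divisor in [2, c) iff no divisor up to √c, for c ≥ 2
lemma divisor_sqrt (c : Int) (hc : 2 ≤ c) :
    (∃ i : Int, 2 ≤ i ∧ i < c ∧ i ∣ c) ↔ (∃ e : Int, 2 ≤ e ∧ e * e ≤ c ∧ e ∣ c) := by
  constructor
  · rintro ⟨i, h2, hic, j, hj⟩
    by_cases hii : i * i ≤ c
    · exact ⟨i, h2, hii, j, hj⟩
    · refine ⟨j, ?_, ?_, i, by linarith [hj]⟩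
      · nlinarith
      · nlinarith
  · rintro ⟨e, h2, hee, he⟩
    exact ⟨e, h2, by nlinarith, he⟩

-- A's primality test equals B's, for the positive counts it is applied to
lemma ifFirstNumber_eq (c : Int) (hc : 1 ≤ c) :
    ifFirstNumber c = (2 ≤ c && isPrimeSqrt c 2) := by
  by_cases h1 : c = 1
  · simp [h1, ifFirstNumber]
  · have hc2 : 2 ≤ c := by omega
    have h2 : (2 ≤ c) = True := by simp [hc2]
    simp only [ifFirstNumber, if_neg h1, h2, decide_true, Bool.true_and]
    by_cases hdiv : ∃ i : Int, 2 ≤ i ∧ i < c ∧ i ∣ c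
    · have : (PySem.List.pyRange 2 c 1).any (fun i => PySem.Int.mod c i == 0) = true := by
        obtain ⟨i, hi2, hic, hid⟩ := hdiv
        refine List.any_eq_true.mpr ⟨i, ?_, ?_⟩
        · exact (PySem.List.mem_pyRange_one).mpr ⟨hi2, hic⟩
        · simpa [PySem.Int.mod_eq_zero_iff_dvd]
      rw [if_pos this]
      have : ∃ e : Int, 2 ≤ e ∧ e * e ≤ c ∧ e ∣ c := (divisor_sqrt c hc2).mp hdiv
      obtain ⟨e, he2, hee, hed⟩ := this
      by_cases hps : isPrimeSqrt c 2 = true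
      · exact absurd ((isPrimeSqrt_iff c 2 (by norm_num)).mp hps e he2 hee) (by simp [hed])
      · simp [Bool.not_eq_true] at hps; simp [hps]
    · have hany : (PySem.List.pyRange 2 c 1).any (fun i => PySem.Int.mod c i == 0) = false := by
        rw [List.any_eq_false]
        intro i hi
        have := (PySem.List.mem_pyRange_one).mp hi
        simp only [beq_iff_eq, PySem.Int.mod_eq_zero_iff_dvd]
        intro hdv
        exact hdiv ⟨i, this.1, this.2, hdv⟩
      rw [if_neg (by simp [hany])]
      have : isPrimeSqrt c 2 = true := by
        rw [isPrimeSqrt_iff c 2 (by norm_num)]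
        intro e he2 hee hed
        exact hdiv ((divisor_sqrt c hc2).mpr ⟨e, he2, hee, hed⟩)
      simp [this]

-- ===== VERDICT (by name: the statement is the Claim_ definition above) =====
lemma count_of_get?_counter (B : List Int) (a : Int) (c : Int)
    (h : (PySem.Dict.counter B).get? a = some c) : 1 ≤ c ∧ c ∈ (PySem.Dict.counter B).values := by
  have hnd := PySem.Dict.nodup_keys_counter B
  have hmem := PySem.Dict.mem_items_of_get?_eq_some (PySem.Dict.counter B) h
  have hval : c ∈ (PySem.Dict.counter B).values := by
    simp only [PySem.Dict.values]
    exact List.mem_map.mpr ⟨(a, c), hmem, rfl⟩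
  have hgd : (PySem.Dict.counter B).getD a 0 = c := PySem.Dict.getD_of_get?_eq_some (PySem.Dict.counter B) 0 h
  rw [PySem.Dict.getD_counter] at hgd
  have hcont : (PySem.Dict.counter B).contains a = true := by
    rw [PySem.Dict.contains_eq_isSome_get?, h]; rfl
  have haB : a ∈ B := by
    have := PySem.Dict.contains_iff_mem_keys (d := PySem.Dict.counter B) (k := a)
    rw [PySem.Dict.keys_counter] at this
    exact (PySem.Set.mem_ofList B a).mp (this.mp hcont)
  have : 1 ≤ B.count a := List.one_le_count_iff.mpr haB
  constructor
  · omega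
  · exact hval

-- the two keep-predicates agree once freq is the counter of B
lemma pred_eq (B : List Int) (a : Int) :
    (!((PySem.Dict.counter B).contains a) ||
       !(ifFirstNumber ((PySem.Dict.counter B).getD a 0)))
    = (match (PySem.Dict.counter B).get? a with
       | none => true
       | some c => !((List.foldl (fun s c => if 2 ≤ c && isPrimeSqrt c 2 then s.add c else s)
           PySem.Set.empty (PySem.Set.ofList (PySem.Dict.counter B).values)).contains c)) := by
  cases hga : (PySem.Dict.counter B).get? a with
  | none =>
    have hcont : (PySem.Dict.counter B).contains a = false := by
      rw [PySem.Dict.contains_eq_isSome_get?, hga]; rfl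
    simp [hcont]
  | some c =>
    have hcont : (PySem.Dict.counter B).contains a = true := by
      rw [PySem.Dict.contains_eq_isSome_get?, hga]; rfl
    obtain ⟨hc1, hval⟩ := count_of_get?_counter B a c hga
    have hgd : (PySem.Dict.counter B).getD a 0 = c := PySem.Dict.getD_of_get?_eq_some (PySem.Dict.counter B) 0 hga
    rw [hcont, hgd]
    simp only [Bool.not_true, Bool.false_or]
    congr 1
    rw [ifFirstNumber_eq c hc1]
    have hmem : (List.foldl (fun s c => if 2 ≤ c && isPrimeSqrt c 2 then s.add c else s)
        PySem.Set.empty (PySem.Set.ofList (PySem.Dict.counter B).values)).contains c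
        = (2 ≤ c && isPrimeSqrt c 2) := by
      apply Bool.eq_iff_iff.mpr
      have hcontains : ∀ (s : PySem.Set Int), s.contains c = true ↔ c ∈ s := fun s => by
        simp [PySem.Set.contains]
      rw [hcontains, mem_foldl_add_if]
      simp [PySem.Set.mem_ofList, hval, PySem.Set.empty]
    rw [hmem]

theorem sequence_c_spec : Claim_equal_sequence_c := by
  unfold Claim_equal_sequence_c
  intro A B _
  show sequence_c A B = sequence_c_alt A B
  simp only [sequence_c, sequence_c_alt, freqA_eq_counter,
    PySem.Dict.foldl_insert_getD_add_one_eq_counter]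
  have hfold := PySem.List.foldl_append_if
    (fun a => !((PySem.Dict.counter B).contains a) ||
      !(ifFirstNumber ((PySem.Dict.counter B).getD a 0))) (id : Int → Int) A []
  simp only [id_eq, List.map_id, List.nil_append] at hfold
  rw [hfold]
  exact List.filter_congr (fun a _ => pred_eq B a)
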